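-- pv_equiv track=rewrite | github.com/simorautiainen/adventofcodeday24 | advent24.py | filterSurplus
-- ===== SOURCE A (Python) =====
-- def filterSurplus(coordinates):
--     final = []
--     i = 0
--     while i < len(coordinates):
--         if not coordinates[i] in coordinates[:i]:
--             if (coordinates.count(coordinates[i]) & 0b1) == 0b1:
--                 final.append(coordinates[i])
--         i += 1
--     return final
-- ===== SOURCE B (Python) =====
-- def filterSurplus(coordinates):
--     parity = {}
--     for c in coordinates:
--         parity[c] = not parity.get(c, False)
--     return [c for c, odd in parity.items() if odd]
-- ===== Notes on version B (the rewrite author's own statement) =====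
-- stated objective: faster
-- what changed: Replaces the index loop with its quadratic prefix-membership test and full-list .count per element by a single pass that flips a parity bit per coordinate in an insertion-ordered dict, then emits keys with odd parity.
import Mathlib
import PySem

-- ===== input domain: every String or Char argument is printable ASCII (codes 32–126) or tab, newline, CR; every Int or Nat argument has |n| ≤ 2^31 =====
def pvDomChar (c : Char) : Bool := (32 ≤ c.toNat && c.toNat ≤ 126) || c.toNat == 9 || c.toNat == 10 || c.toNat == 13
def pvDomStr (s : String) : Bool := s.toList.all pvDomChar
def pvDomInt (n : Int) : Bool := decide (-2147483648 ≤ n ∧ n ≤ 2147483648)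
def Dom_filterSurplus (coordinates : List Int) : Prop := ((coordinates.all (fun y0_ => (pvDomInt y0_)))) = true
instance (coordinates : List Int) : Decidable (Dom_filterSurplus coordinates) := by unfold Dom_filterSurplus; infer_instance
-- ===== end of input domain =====

-- B replaces A's quadratic index loop (prefix-membership test plus full-list .count per element)
-- by one parity-flipping pass over an insertion-ordered dict, then emits the keys with odd parity.

-- ===== PORT A =====
-- A's while loop: i walks the indices; 'coordinates[:i]' is PySem.List.slice, '.count' is
-- PySem.List.count, '& 0b1 == 0b1' is PySem.Int.band … = 1.
def filterSurplusGo (coordinates : List Int) (final : List Int) (i : Nat) : List Int :=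
  if h : i < coordinates.length then
    let c := coordinates[i]
    let final' :=
      if !((PySem.List.slice coordinates none (some (i : Int))).contains c) then
        if PySem.Int.band ((PySem.List.count coordinates c : Int)) 1 = 1 then final ++ [c]
        else final
      else final
    filterSurplusGo coordinates final' (i + 1)
  else final
termination_by coordinates.length - i

def filterSurplus (coordinates : List Int) : List Int :=
  filterSurplusGo coordinates [] 0

-- ===== PORT B =====
-- the 'parity' dict of Source B: parity[c] = not parity.get(c, False) for each c in order
def filterSurplusParity (coordinates : List Int) : PySem.Dict Int Bool :=
  coordinates.foldl (fun d c => d.insert c (!(d.getD c false))) PySem.Dict.empty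

def filterSurplus_alt (coordinates : List Int) : List Int :=
  ((filterSurplusParity coordinates).items.filter (fun kv => kv.2)).map (fun kv => kv.1)

-- ===== PRECONDITION & SPEC =====
def Spec_filterSurplus (coordinates : List Int) (out : List Int) : Prop := out = filterSurplus_alt coordinates
instance (coordinates : List Int) (out : List Int) : Decidable (Spec_filterSurplus coordinates out) := by unfold Spec_filterSurplus; infer_instance

-- ===== CLAIM (what is proved, stated in full; the proofs are below) =====
def Claim_equal_filterSurplus : Prop := ∀ (coordinates : List Int), Dom_filterSurplus coordinates → Spec_filterSurplus coordinates (filterSurplus coordinates)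

-- ===== LEMMAS AND PROOFS =====

-- elements of xs whose first occurrence is outside `seen`, filtered by p, in first-occurrence
-- order: the proof-side characterisation of A's loop body
def specGo (p : Int → Bool) (seen : List Int) : List Int → List Int
  | [] => []
  | c :: rest =>
    if c ∈ seen then specGo p seen rest
    else (if p c then [c] else []) ++ specGo p (seen ++ [c]) rest

def pA (coordinates : List Int) (c : Int) : Bool :=
  decide (PySem.Int.band ((PySem.List.count coordinates c : Int)) 1 = 1)

theorem specGo_eq_filter (p : Int → Bool) (xs : List Int) :
    ∀ seen : List Int,
      specGo p seen xs
        = (PySem.Set.ofList xs).filter (fun c => !(seen.contains c) && p c) := by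
  induction xs with
  | nil => intro seen; simp [specGo, PySem.Set.ofList_nil]
  | cons c rest ih =>
    intro seen
    rw [PySem.Set.ofList_cons]
    simp only [specGo, PySem.Set.discard, List.filter_filter, List.filter_cons]
    by_cases hm : c ∈ seen
    · rw [if_pos hm, ih seen]
      simp only [List.contains_eq_mem, hm, decide_true, Bool.not_true, Bool.false_and]
      rw [if_neg (by simp)]
      apply List.filter_congr
      intro y _
      by_cases hyc : y = c
      · subst hyc; simp [hm]
      · simp [hyc]
    · rw [if_neg hm, ih (seen ++ [c])]
      have hq : (PySem.Set.ofList rest).filter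
            (fun a => !((seen ++ [c]).contains a) && p a)
          = (PySem.Set.ofList rest).filter
            (fun a => !(seen.contains a) && p a && !(a == c)) := by
        apply List.filter_congr
        intro y _
        by_cases hyc : y = c
        · subst hyc; simp
        · simp [hyc, List.mem_append]
      rw [hq]
      simp only [List.contains_eq_mem, hm, decide_false, Bool.not_false, Bool.true_and]
      by_cases hp : p c = true
      · simp [hp]
      · simp [hp]

theorem go_eq (coords : List Int) (i : Nat) (final : List Int) :
    filterSurplusGo coords final i
      = final ++ specGo (pA coords) (coords.take i) (coords.drop i) := by
  rw [filterSurplusGo]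
  by_cases h : i < coords.length
  · simp only [dif_pos h]
    have hdrop : coords.drop i = coords[i] :: coords.drop (i + 1) :=
      List.drop_eq_getElem_cons h
    have htake : coords.take (i + 1) = coords.take i ++ [coords[i]] := by
      rw [List.take_add_one]
      simp [List.getElem?_eq_getElem h]
    rw [go_eq coords (i + 1)]
    rw [hdrop, PySem.List.slice_to coords (by positivity)]
    simp only [Int.toNat_natCast, specGo, htake]
    by_cases hm : coords[i] ∈ coords.take i
    · rw [if_pos hm]
      simp only [List.contains_eq_mem, hm, decide_true, Bool.not_true]
      rw [if_neg (by simp)]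
      rw [specGo_eq_filter, specGo_eq_filter]
      congr 1
      apply List.filter_congr
      intro y _
      by_cases hyc : y = coords[i]
      · subst hyc
        have hmem : coords[i] ∈ coords.take (i + 1) := by
          rw [htake]; exact List.mem_append_right _ (by simp)
        simp [hmem, hm]
      · have hiff : (y ∈ coords.take (i + 1)) ↔ y ∈ coords.take i := by
          rw [htake, List.mem_append]
          simp [hyc]
        simp [hiff]
    · rw [if_neg hm]
      simp only [List.contains_eq_mem, hm, decide_false, Bool.not_false, if_true, pA]
      by_cases hp : PySem.Int.band ((List.count coords[i] coords : Int)) 1 = 1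
      · simp [PySem.List.count, hp]
      · simp [PySem.List.count, hp]
  · simp only [dif_neg h]
    have : coords.drop i = [] := List.drop_eq_nil_of_le (by omega)
    simp [this, specGo]
termination_by coords.length - i

theorem getD_foldl_flip (xs : List Int) :
    ∀ (d : PySem.Dict Int Bool) (c : Int),
      (xs.foldl (fun d c => d.insert c (!(d.getD c false))) d).getD c false
        = xor (d.getD c false) (decide (xs.count c % 2 = 1)) := by
  induction xs with
  | nil => intro d c; simp
  | cons x rest ih =>
    intro d c
    simp only [List.foldl_cons]
    rw [ih, PySem.Dict.getD_insert]
    by_cases hc : c = x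
    · subst hc
      rw [if_pos rfl]
      have hcnt : (c :: rest).count c = rest.count c + 1 := by
        simp
      rw [hcnt]
      by_cases hodd : rest.count c % 2 = 1
      · have h2 : ¬((rest.count c + 1) % 2 = 1) := by omega
        simp [hodd, h2]
      · have h2 : (rest.count c + 1) % 2 = 1 := by omega
        simp [hodd, h2]
    · rw [if_neg hc]
      have hcnt : (x :: rest).count c = rest.count c := by
        simp [List.count_cons]
        exact fun h => hc h.symm
      rw [hcnt]

theorem filterSurplus_alt_eq_filter (coords : List Int) :
    filterSurplus_alt coords
      = (PySem.Set.ofList coords).filter (fun c => decide (coords.count c % 2 = 1)) := by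
  unfold filterSurplus_alt filterSurplusParity
  have hkeys :
      (coords.foldl (fun d c => d.insert c (!(d.getD c false)))
        (PySem.Dict.empty : PySem.Dict Int Bool)).keys = PySem.Set.ofList coords := by
    rw [PySem.Dict.keys_foldl_insert]
    simp [PySem.Set.update_nil_left]
  have hnd :
      (coords.foldl (fun d c => d.insert c (!(d.getD c false)))
        (PySem.Dict.empty : PySem.Dict Int Bool)).keys.Nodup :=
    PySem.Dict.nodup_keys_foldl_insert _ _ _ (by simp)
  have hval : ∀ c : Int,
      (coords.foldl (fun d c => d.insert c (!(d.getD c false)))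
        (PySem.Dict.empty : PySem.Dict Int Bool)).getD c false
        = decide (coords.count c % 2 = 1) := by
    intro c
    rw [getD_foldl_flip]
    simp
  rw [PySem.Dict.items_eq_map_keys _ hnd false, hkeys]
  rw [List.filter_map, List.map_map]
  simp only [Function.comp_def]
  rw [List.filter_congr (fun y _ => hval y)]
  exact List.map_id _

theorem filterSurplus_eq_filter (coords : List Int) :
    filterSurplus coords
      = (PySem.Set.ofList coords).filter (fun c => decide (coords.count c % 2 = 1)) := by
  unfold filterSurplus
  rw [go_eq]
  simp only [List.take_zero, List.drop_zero, List.nil_append]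
  rw [specGo_eq_filter]
  apply List.filter_congr
  intro c _
  simp only [List.contains_eq_mem, List.not_mem_nil, decide_false, Bool.not_false,
    Bool.true_and, pA]
  rw [PySem.Int.band_one]
  have hmod : PySem.Int.mod ((PySem.List.count coords c : Int)) 2
      = ((PySem.List.count coords c % 2 : Nat) : Int) := by
    exact_mod_cast PySem.Int.mod_natCast (PySem.List.count coords c) 2
  rw [hmod]
  have hc : PySem.List.count coords c = coords.count c := rfl
  rw [hc]
  by_cases h : coords.count c % 2 = 1
  · simp [h]
  · simp [h]
    omega

-- ===== VERDICT (by name: the statement is the Claim_ definition above) =====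
theorem filterSurplus_spec : Claim_equal_filterSurplus := by
  intro coords _
  unfold Spec_filterSurplus
  rw [filterSurplus_eq_filter, filterSurplus_alt_eq_filter]
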